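-- pv_equiv track=rewrite | github.com/eblume/pcc | pcc/stringtools.py | unique_string
-- ===== SOURCE A (Python) =====
-- import itertools
--
-- def unique_string(existing,length=6,lower=True,upper=True,number=True,
--                   prefix=None, suffix=None):
--     """Generate a new string that is not a member of `existing`.
--
--     `existing` should be a set, but any object that supports the *in* syntax for
--     querying membership will work.
--
--     `length` will be the length of the generated string.
--
--     If `lower` is left as True, the string will be generated using lowercase
--     letters. If `upper` is True, uppercase letters will be used. If `number` is
--     True, numbers will be used. These options may be combined. At least one
--     must be turned on.
--
--     If `prefix` or `suffix` are set to some string, then that string will be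
--     prepended or appended to every generated string before testing for
--     uniqueness. The result will be a prefixed and/or suffixed string with some
--     random kernel, in which the kernel alone is the length specified by
--     `length`. In other words, `length` does not apply to the prefix or the
--     suffix.
--
--     >>> pre = {'one','two','another_string',"Any length works","sixsix"}
--     >>> unique_string(pre) in pre
--     False
--     >>> unique_string(pre,upper=False) in pre
--     False
--     >>> unique_string(pre,lower=False,upper=False,number=False) in pre
--     Traceback (most recent call last):
--         ...
--     ValueError: You must specify at least one of the generating sets
--     >>> pre = {"0","1","2","3","4","5","6","7","8","9"}
--     >>> unique_string(pre,lower=False,upper=False,length=1) in pre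
--     Traceback (most recent call last):
--         ...
--     ValueError: The specified existing set is already full for this length
--     >>> unique_string(pre,lower=False,upper=False,length=1,prefix="_",
--     ... suffix="_") in pre
--     False
--     """
--     gen_set = ""
--     if lower:
--         gen_set += "abcdefghijklmnopqrstuvwxyz"
--     if upper:
--         gen_set += "ABCDEFGHIJKLMNOPQRSTUVWXYZ"
--     if number:
--         gen_set += "0123456789"
--
--     if not gen_set:
--         raise ValueError("You must specify at least one of the generating sets")
--
--     for gen in itertools.product(gen_set,repeat=length):
--         gen = "".join(gen)
--         if prefix:
--             gen = prefix + gen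
--         if suffix:
--             gen = gen + suffix
--         if gen not in existing:
--             return gen
--
--     raise ValueError("The specified existing set is already full for this "
--                      "length")
-- ===== SOURCE B (Python) =====
-- def unique_string(existing, length=6, lower=True, upper=True, number=True,
--                   prefix=None, suffix=None):
--     gen_set = ""
--     if lower:
--         gen_set += "abcdefghijklmnopqrstuvwxyz"
--     if upper:
--         gen_set += "ABCDEFGHIJKLMNOPQRSTUVWXYZ"
--     if number:
--         gen_set += "0123456789"
--     if not gen_set:
--         raise ValueError("You must specify at least one of the generating sets")
--
--     base = len(gen_set)
--     idx = {c: i for i, c in enumerate(gen_set)}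
--     pre = prefix if prefix else ""
--     suf = suffix if suffix else ""
--
--     # rank (base-`base` numeral value) of every kernel already taken in `existing`
--     ranks = set()
--     for s in existing:
--         if len(s) != len(pre) + length + len(suf):
--             continue
--         if not (s.startswith(pre) and s.endswith(suf)):
--             continue
--         r = 0
--         ok = True
--         for ch in s[len(pre):len(pre) + length]:
--             if ch not in idx:
--                 ok = False
--                 break
--             r = r * base + idx[ch]
--         if ok:
--             ranks.add(r)
--
--     # smallest non-taken rank = mex of the sorted rank set
--     m = 0
--     for r in sorted(ranks):
--         if r == m:
--             m += 1
--
--     if m >= base ** length: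
--         raise ValueError("The specified existing set is already full for this "
--                          "length")
--
--     # decode rank m back into the lexicographically-first free kernel
--     digits = []
--     for _ in range(length):
--         digits.append(gen_set[m % base])
--         m //= base
--     return pre + "".join(reversed(digits)) + suf
-- ===== Notes on version B (the rewrite author's own statement) =====
-- stated objective: alternative
-- what changed: A enumerates all base**length candidate kernels in product order and tests each decorated candidate against `existing`; B instead makes one pass over `existing` collecting the base-`base` rank of every kernel already taken, finds the smallest free rank by a sorted mex scan, and decodes that rank back into the kernel by repeated divmod.
import Mathlib
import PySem

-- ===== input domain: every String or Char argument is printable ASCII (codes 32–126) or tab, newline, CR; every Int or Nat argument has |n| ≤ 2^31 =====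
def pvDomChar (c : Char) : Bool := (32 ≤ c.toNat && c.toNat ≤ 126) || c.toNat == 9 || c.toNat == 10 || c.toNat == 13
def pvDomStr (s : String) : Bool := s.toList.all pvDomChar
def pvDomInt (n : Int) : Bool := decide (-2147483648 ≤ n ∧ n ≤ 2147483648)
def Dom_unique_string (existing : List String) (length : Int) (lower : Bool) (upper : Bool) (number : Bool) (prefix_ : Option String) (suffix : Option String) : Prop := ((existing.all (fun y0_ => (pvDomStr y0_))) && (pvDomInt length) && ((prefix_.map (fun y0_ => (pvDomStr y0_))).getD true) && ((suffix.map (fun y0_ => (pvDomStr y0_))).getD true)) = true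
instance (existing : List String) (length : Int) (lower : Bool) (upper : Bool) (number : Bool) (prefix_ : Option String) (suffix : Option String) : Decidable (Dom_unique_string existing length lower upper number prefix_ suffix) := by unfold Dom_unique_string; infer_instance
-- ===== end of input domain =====

-- B replaces A's brute-force scan of all base**length candidate kernels by one pass over `existing`
-- (collecting the base-`base` rank of every kernel already taken), a sorted-mex scan giving the
-- smallest free rank, and a base-conversion decode of that rank (objective: alternative algorithm).

-- ===== PORT A =====

-- gen_set assembly (identical lines in both Pythons; shared helper)
def pvGenSet (lower upper number : Bool) : List Char :=
  ((if lower then "abcdefghijklmnopqrstuvwxyz".toList else []) ++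
   (if upper then "ABCDEFGHIJKLMNOPQRSTUVWXYZ".toList else [])) ++
  (if number then "0123456789".toList else [])

-- A's `if prefix: gen = prefix + gen` / `if suffix: gen = gen + suffix` (Python truthiness)
def pvDecorate (prefix_ suffix : Option String) (k : List Char) : String :=
  let g := String.ofList k
  let g := match prefix_ with
           | some p => if p = "" then g else p ++ g
           | none => g
  match suffix with
  | some s => if s = "" then g else g ++ s
  | none => g

-- A's `for gen in itertools.product(gen_set, repeat=length)` with the early `return`:
-- lazy depth-first enumeration in product order, testing each decorated candidate against `existing`
def pvSearchA (existing : List String) (gs : List Char) (prefix_ suffix : Option String) :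
    List Char → Nat → Option String
  | acc, 0 =>
    let g := pvDecorate prefix_ suffix acc
    if existing.contains g then none else some g
  | acc, n+1 => gs.findSome? (fun c => pvSearchA existing gs prefix_ suffix (acc ++ [c]) n)

def unique_string (existing : List String) (length : Int) (lower : Bool) (upper : Bool) (number : Bool) (prefix_ : Option String) (suffix : Option String) : String :=
  let gen_set := pvGenSet lower upper number
  if gen_set.isEmpty then ""   -- raise ValueError("You must specify at least one of the generating sets")  (outside Pre_)
  else
    match pvSearchA existing gen_set prefix_ suffix [] length.toNat with
    | some g => g
    | none => ""               -- raise ValueError("... already full for this length")  (outside Pre_)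

-- ===== PORT B =====

-- idx = {c: i for i, c in enumerate(gen_set)}
def pvIdxDict (gs : List Char) : PySem.Dict Char Int :=
  (PySem.List.enumerate gs 0).foldl (fun d p => d.insert p.2 p.1) PySem.Dict.empty

-- B's per-character rank loop body: state (r, ok); once ok is False the Python loop has broken out
def pvRankStep (idx : PySem.Dict Char Int) (base : Int) (st : Int × Bool) (ch : Char) : Int × Bool :=
  if st.2 then
    match idx.get? ch with
    | some i => (st.1 * base + i, true)
    | none => (st.1, false)
  else st

-- B's decode loop: for _ in range(length): digits.append(gen_set[m % base]); m //= base
-- (gen_set[m % base] is in range since 0 < base; pyGet? .getD is that exact access)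
def pvDecodeLoop (gs : List Char) (base : Int) : Nat → List Char × Int → List Char × Int
  | 0, st => st
  | n+1, (ds, m) =>
    pvDecodeLoop gs base n
      (ds ++ [(PySem.List.pyGet? gs (PySem.Int.mod m base)).getD ' '], PySem.Int.floordiv m base)

def unique_string_alt (existing : List String) (length : Int) (lower : Bool) (upper : Bool) (number : Bool) (prefix_ : Option String) (suffix : Option String) : String :=
  let gen_set := pvGenSet lower upper number
  if gen_set.isEmpty then ""   -- raise ValueError("You must specify at least one of the generating sets")  (outside Pre_)
  else
    let base : Int := gen_set.length
    let idx := pvIdxDict gen_set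
    let pre := prefix_.getD ""   -- pre = prefix if prefix else ""
    let suf := suffix.getD ""
    let ranks : PySem.Set Int := existing.foldl (fun rs s =>
      if PySem.Str.len s ≠ PySem.Str.len pre + length + PySem.Str.len suf then rs
      else if ¬ (PySem.Str.startswith s pre = true ∧ PySem.Str.endswith s suf = true) then rs
      else
        let st := (PySem.Str.slice s (some (PySem.Str.len pre))
                    (some (PySem.Str.len pre + length))).toList.foldl
                  (pvRankStep idx base) ((0 : Int), true)
        if st.2 then PySem.Set.add rs st.1 else rs) PySem.Set.empty
    let m := (PySem.List.sorted ranks (fun x => x) false).foldl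
               (fun m r => if r = m then m + 1 else m) (0 : Int)
    if base ^ length.toNat ≤ m then ""   -- raise ValueError("... already full for this length")  (length ≥ 0 inside Pre_)
    else
      let st := pvDecodeLoop gen_set base length.toNat ([], m)
      pre ++ String.ofList st.1.reverse ++ suf

-- ===== PRECONDITION & SPEC =====

-- the kernel of s if s is (prefix?)++kernel++(suffix?) with a kernel of the right length over gs
def pvKernelOf? (gs : List Char) (prefix_ suffix : Option String) (length : Int) (s : String) :
    Option (List Char) :=
  let p := (prefix_.getD "").toList
  let sf := (suffix.getD "").toList
  let l := s.toList
  let k := (l.drop p.length).take length.toNat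
  if l.length = p.length + length.toNat + sf.length ∧ p <+: l ∧ sf <:+ l ∧ ∀ c ∈ k, c ∈ gs
  then some k else none

-- decides b ^ n ≤ cnt without materialising b ^ n (for b ≥ 2 the fuel recursion exits
-- after O(log cnt) steps because cnt / b shrinks; b ≤ 1 is answered directly)
def pvPowLeGo (b : Nat) : Nat → Nat → Bool
  | 0, cnt => 1 ≤ cnt
  | n+1, cnt => b ≤ cnt && pvPowLeGo b n (cnt / b)

def pvPowLeCnt (b n cnt : Nat) : Bool :=
  if b = 0 then (if n = 0 then 1 ≤ cnt else true)
  else if b = 1 then 1 ≤ cnt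
  else pvPowLeGo b n cnt

-- Pre_ excludes exactly the inputs where Python A raises ValueError: no generating set chosen,
-- a negative length (itertools.product rejects it), and the already-full case (every one of the
-- base^length kernels is taken in `existing`, i.e. base^length ≤ number of distinct taken kernels).
def Pre_unique_string (existing : List String) (length : Int) (lower : Bool) (upper : Bool) (number : Bool) (prefix_ : Option String) (suffix : Option String) : Prop :=
  (lower || upper || number) = true ∧ 0 ≤ length ∧
  pvPowLeCnt (pvGenSet lower upper number).length length.toNat
    (PySem.Set.ofList (existing.filterMap
      (pvKernelOf? (pvGenSet lower upper number) prefix_ suffix length))).length = false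

instance (existing : List String) (length : Int) (lower : Bool) (upper : Bool) (number : Bool) (prefix_ : Option String) (suffix : Option String) : Decidable (Pre_unique_string existing length lower upper number prefix_ suffix) := by
  unfold Pre_unique_string; infer_instance

def pvWitness_unique_string : List String × Int × Bool × Bool × Bool × Option String × Option String :=
  (["abc"], 1, true, false, false, none, none)

def Spec_unique_string (existing : List String) (length : Int) (lower : Bool) (upper : Bool) (number : Bool) (prefix_ : Option String) (suffix : Option String) (out : String) : Prop := out = unique_string_alt existing length lower upper number prefix_ suffix
instance (existing : List String) (length : Int) (lower : Bool) (upper : Bool) (number : Bool) (prefix_ : Option String) (suffix : Option String) (out : String) : Decidable (Spec_unique_string existing length lower upper number prefix_ suffix out) := by unfold Spec_unique_string; infer_instance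

-- ===== CLAIM (what is proved, stated in full; the proofs are below) =====
def Claim_equal_unique_string : Prop := ∀ (existing : List String) (length : Int) (lower : Bool) (upper : Bool) (number : Bool) (prefix_ : Option String) (suffix : Option String), Dom_unique_string existing length lower upper number prefix_ suffix → Pre_unique_string existing length lower upper number prefix_ suffix → Spec_unique_string existing length lower upper number prefix_ suffix (unique_string existing length lower upper number prefix_ suffix)

-- ===== LEMMAS AND PROOFS =====

-- itertools.product(gs, repeat=n) as a list, in product order
def pvProdAll (gs : List Char) : Nat → List (List Char)
  | 0 => [[]]
  | n+1 => gs.flatMap (fun c => (pvProdAll gs n).map (c :: ·))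

-- rank of a kernel: its index in product order (base gs.length numeral on character indices)
def pvRk (gs : List Char) (t : List Char) : Nat :=
  t.foldl (fun r c => r * gs.length + List.idxOf c gs) 0

-- base-gs.length digits of j, least significant first
def pvDigitsLSB (gs : List Char) : Nat → Nat → List Char
  | 0, _ => []
  | n+1, j => gs.getD (j % gs.length) ' ' :: pvDigitsLSB gs n (j / gs.length)

theorem pvGenSet_nodup (lower upper number : Bool) : (pvGenSet lower upper number).Nodup := by
  cases lower <;> cases upper <;> cases number <;> decide

theorem pvGenSet_ne_nil (lower upper number : Bool) (h : (lower || upper || number) = true) :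
    pvGenSet lower upper number ≠ [] := by
  cases lower <;> cases upper <;> cases number <;> simp_all <;> decide

theorem pv_map_findSome? {α β γ : Type} (l : List α) (f : α → Option β) (g : β → γ) :
    (l.findSome? f).map g = l.findSome? (fun a => (f a).map g) := by
  induction l with
  | nil => simp
  | cons x xs ih =>
    simp only [List.findSome?_cons]
    cases f x <;> simp [ih]

theorem pv_find?_flatMap {α β : Type} (l : List α) (g : α → List β) (p : β → Bool) :
    (l.flatMap g).find? p = l.findSome? (fun a => (g a).find? p) := by
  induction l with
  | nil => simp
  | cons x xs ih =>
    simp only [List.flatMap_cons, List.find?_append, List.findSome?_cons, ih]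
    cases (g x).find? p <;> simp [Option.or]

theorem pvSearchA_eq (existing : List String) (gs : List Char) (p s : Option String) :
    ∀ (n : Nat) (acc : List Char),
    pvSearchA existing gs p s acc n =
      ((pvProdAll gs n).find? (fun t => !(existing.contains (pvDecorate p s (acc ++ t))))).map
        (fun t => pvDecorate p s (acc ++ t)) := by
  intro n
  induction n with
  | zero =>
    intro acc
    simp only [pvSearchA, pvProdAll, List.find?, List.append_nil]
    by_cases h : pvDecorate p s acc ∈ existing
    · simp [h]
    · simp [h]
  | succ n ih =>
    intro acc
    show gs.findSome? _ = _
    rw [show pvProdAll gs (n+1) = gs.flatMap (fun c => (pvProdAll gs n).map (c :: ·)) from rfl,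
        pv_find?_flatMap, pv_map_findSome?]
    congr 1
    funext c
    rw [ih (acc ++ [c]), List.find?_map, Option.map_map]
    simp only [Function.comp_def, List.append_assoc, List.singleton_append]

theorem pv_mem_prodAll (gs : List Char) :
    ∀ (n : Nat) (t : List Char), t ∈ pvProdAll gs n ↔ t.length = n ∧ ∀ c ∈ t, c ∈ gs := by
  intro n
  induction n with
  | zero =>
    intro t
    constructor
    · intro h; simp only [pvProdAll, List.mem_singleton] at h; subst h; simp
    · rintro ⟨h, -⟩
      rw [List.length_eq_zero_iff] at h; subst h; simp [pvProdAll]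
  | succ n ih =>
    intro t
    cases t with
    | nil =>
      simp only [pvProdAll, List.mem_flatMap, List.mem_map]
      constructor
      · rintro ⟨c, -, t', -, h⟩; exact absurd h (by simp)
      · rintro ⟨h, -⟩; simp at h
    | cons c t' =>
      simp only [pvProdAll, List.mem_flatMap, List.mem_map]
      constructor
      · rintro ⟨c0, hc0, t0, ht0, heq⟩
        obtain ⟨hl, hm⟩ := (ih t0).mp ht0
        rw [List.cons.injEq] at heq
        refine ⟨by simp [← heq.2, hl], ?_⟩
        intro x hx
        rcases List.mem_cons.mp hx with rfl | hx
        · rw [← heq.1]; exact hc0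
        · rw [← heq.2] at hx; exact hm x hx
      · rintro ⟨hl, hm⟩
        refine ⟨c, hm c (by simp), t', (ih t').mpr ⟨by simpa using hl, fun x hx => hm x (List.mem_cons_of_mem _ hx)⟩, rfl⟩


theorem pvRk_from (gs : List Char) :
    ∀ (t : List Char) (a : Nat),
    t.foldl (fun r c => r * gs.length + List.idxOf c gs) a = a * gs.length ^ t.length + pvRk gs t := by
  intro t
  induction t with
  | nil => intro a; simp [pvRk]
  | cons c t ih =>
    intro a
    have h0 : pvRk gs (c :: t) = List.idxOf c gs * gs.length ^ t.length + pvRk gs t := by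
      show t.foldl _ (0 * gs.length + List.idxOf c gs) = _
      rw [ih]; ring_nf
    simp only [List.foldl_cons, ih, h0, List.length_cons]
    ring


theorem pvRk_append_singleton (gs : List Char) (t : List Char) (c : Char) :
    pvRk gs (t ++ [c]) = pvRk gs t * gs.length + List.idxOf c gs := by
  simp [pvRk, List.foldl_append]


theorem pv_blocks {N : Nat} (gs : List Char) :
    ∀ (l : List Char) (k : Nat), (∀ (i : Nat) (h : i < l.length), List.idxOf l[i] gs = k + i) →
    (l.flatMap (fun c => (List.range N).map (fun j => List.idxOf c gs * N + j))) =
      (List.range (l.length * N)).map (fun j => k * N + j) := by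
  intro l
  induction l with
  | nil => intro k _; simp
  | cons c l ih =>
    intro k h
    have h0 : List.idxOf c gs = k := by simpa using h 0 (by simp)
    have h' : ∀ (i : Nat) (hi : i < l.length), List.idxOf l[i] gs = (k + 1) + i := by
      intro i hi
      have := h (i + 1) (by simpa using Nat.succ_lt_succ hi)
      simpa [Nat.add_assoc, Nat.add_comm 1 i] using this
    rw [List.flatMap_cons, ih (k + 1) h', h0]
    have hsplit : (l.length + 1) * N = N + l.length * N := by ring
    rw [List.length_cons, hsplit, List.range_add, List.map_append, List.map_map]
    congr 1
    apply List.map_congr_left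
    intro j _
    simp only [Function.comp_apply]
    ring


theorem pvProd_map_rk (gs : List Char) (hnd : gs.Nodup) :
    ∀ (n : Nat), (pvProdAll gs n).map (pvRk gs) = List.range (gs.length ^ n) := by
  intro n
  induction n with
  | zero => simp [pvProdAll, pvRk]
  | succ n ih =>
    show ((gs.flatMap fun c => (pvProdAll gs n).map (c :: ·)).map (pvRk gs)) = _
    rw [List.map_flatMap]
    have hstep : ∀ c : Char, ((pvProdAll gs n).map (c :: ·)).map (pvRk gs)
        = (List.range (gs.length ^ n)).map (fun j => List.idxOf c gs * gs.length ^ n + j) := by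
      intro c
      rw [List.map_map, ← ih, List.map_map]
      apply List.map_congr_left
      intro t ht
      have hl : t.length = n := ((pv_mem_prodAll gs n t).mp ht).1
      show pvRk gs (c :: t) = _
      show t.foldl _ (0 * gs.length + List.idxOf c gs) = _
      rw [pvRk_from, hl]
      simp only [Function.comp_apply]
      ring
    simp only [List.map_map] at hstep ⊢
    simp only [hstep]
    have := pv_blocks (N := gs.length ^ n) gs gs 0
      (fun i hi => by simpa using List.Nodup.idxOf_getElem hnd i hi)
    rw [this]
    simp [pow_succ, Nat.mul_comm]


theorem pv_find?_eq_getElem {α : Type} (p : α → Bool) :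
    ∀ (l : List α) (k : Nat) (hk : k < l.length),
    (∀ (i : Nat) (h : i < k), p (l[i]'(by omega)) = false) → p (l[k]'hk) = true →
    l.find? p = some (l[k]'hk) := by
  intro l
  induction l with
  | nil => intro k hk; simp at hk
  | cons x l ih =>
    intro k hk hbefore hat
    cases k with
    | zero =>
      simp only [List.getElem_cons_zero] at hat
      simp [List.find?_cons, hat]
    | succ k =>
      have hx : p x = false := by simpa using hbefore 0 (Nat.succ_pos k)
      have hk' : k < l.length := by simpa using hk
      have := ih k hk' (fun i hi => by simpa using hbefore (i+1) (by omega))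
        (by simpa using hat)
      simp [List.find?_cons, hx, this]


theorem pv_mexfold_spec :
    ∀ (l : List Int) (m0 : Int), l.Pairwise (· < ·) →
    (l.foldl (fun m r => if r = m then m + 1 else m) m0) ∉ l ∧
    m0 ≤ (l.foldl (fun m r => if r = m then m + 1 else m) m0) ∧
    ∀ j : Int, m0 ≤ j → j < (l.foldl (fun m r => if r = m then m + 1 else m) m0) → j ∈ l := by
  intro l
  induction l with
  | nil =>
    intro m0 _
    refine ⟨by simp, le_refl _, ?_⟩
    intro j h1 h2
    simp only [List.foldl_nil] at h2
    omega
  | cons r l ih =>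
    intro m0 hp
    obtain ⟨hr, hp'⟩ := List.pairwise_cons.mp hp
    simp only [List.foldl_cons]
    by_cases h0 : r = m0
    · subst h0
      rw [if_pos rfl]
      obtain ⟨h1, h2, h3⟩ := ih (r + 1) hp'
      refine ⟨?_, by omega, ?_⟩
      · intro hmem
        rcases List.mem_cons.mp hmem with heq | hmem
        · omega
        · exact h1 hmem
      · intro j hj1 hj2
        by_cases hjr : j = r
        · exact hjr ▸ List.mem_cons_self
        · exact List.mem_cons_of_mem _ (h3 j (by omega) hj2)
    · simp only [if_neg h0]
      obtain ⟨h1, h2, h3⟩ := ih m0 hp'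
      refine ⟨?_, h2, ?_⟩
      · intro hmem
        rcases List.mem_cons.mp hmem with heq | hmem
        · -- fold result = r : impossible
          by_cases hm : l.foldl (fun m r => if r = m then m + 1 else m) m0 = m0
          · exact h0 (by omega)
          · have hmem0 : m0 ∈ l := h3 m0 (le_refl _) (by omega)
            have := hr m0 hmem0
            omega
        · exact h1 hmem
      · intro j hj1 hj2
        exact List.mem_cons_of_mem _ (h3 j hj1 hj2)


theorem pv_enumFold_get? (c : Char) :
    ∀ (l : List Char) (st : Int) (d : PySem.Dict Char Int), l.Nodup →
    (((PySem.List.enumerate l st).foldl (fun d p => d.insert p.2 p.1) d).get? c)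
      = if c ∈ l then some (st + (List.idxOf c l : Int)) else d.get? c := by
  intro l
  induction l with
  | nil => intro st d _; simp [PySem.List.enumerate_nil]
  | cons x xs ih =>
    intro st d hnd
    obtain ⟨hx, hnd'⟩ := List.nodup_cons.mp hnd
    rw [PySem.List.enumerate_cons]
    simp only [List.foldl_cons]
    rw [ih (st + 1) (d.insert x st) hnd']
    by_cases hc : c ∈ xs
    · have hcx : c ≠ x := fun h => hx (h ▸ hc)
      rw [if_pos hc, if_pos (List.mem_cons_of_mem _ hc)]
      rw [List.idxOf_cons_ne _ (fun h => hcx h.symm)]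
      push_cast
      ring_nf
    · rw [if_neg hc]
      by_cases hcx : c = x
      · subst hcx
        rw [PySem.Dict.get?_insert_self, if_pos List.mem_cons_self]
        simp [List.idxOf_cons_self]
      · rw [PySem.Dict.get?_insert_of_ne _ _ hcx,
          if_neg (by intro h; rcases List.mem_cons.mp h with h | h; exact hcx h; exact hc h)]

theorem pvIdxDict_get? (gs : List Char) (hnd : gs.Nodup) (c : Char) :
    (pvIdxDict gs).get? c = if c ∈ gs then some ((List.idxOf c gs : Nat) : Int) else none := by
  rw [pvIdxDict, pv_enumFold_get? c gs 0 PySem.Dict.empty hnd]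
  by_cases h : c ∈ gs
  · simp [h]
  · rw [if_neg h, if_neg h]; rfl


theorem pvRankFold_snd (gs : List Char) (hnd : gs.Nodup) (t : List Char) :
    ∀ (st : Int × Bool),
    (t.foldl (pvRankStep (pvIdxDict gs) (gs.length : Int)) st).2 =
      (st.2 && t.all (· ∈ gs)) := by
  induction t with
  | nil => intro st; simp
  | cons c t ih =>
    rintro ⟨r, ok⟩
    cases ok with
    | false =>
      have hstep : pvRankStep (pvIdxDict gs) (gs.length : Int) (r, false) c = (r, false) := by
        simp [pvRankStep]
      simp only [List.foldl_cons, hstep]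
      rw [ih (r, false)]
      simp
    | true =>
      by_cases hc : c ∈ gs
      · have hstep : pvRankStep (pvIdxDict gs) (gs.length : Int) (r, true) c
            = (r * (gs.length : Int) + ((List.idxOf c gs : Nat) : Int), true) := by
          simp [pvRankStep, pvIdxDict_get? gs hnd c, hc]
        simp only [List.foldl_cons, hstep]
        rw [ih _]
        simp [hc]
      · have hstep : pvRankStep (pvIdxDict gs) (gs.length : Int) (r, true) c = (r, false) := by
          simp [pvRankStep, pvIdxDict_get? gs hnd c, hc]
        simp only [List.foldl_cons, hstep]
        rw [ih _]
        simp [hc]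

theorem pvRankFold_fst (gs : List Char) (hnd : gs.Nodup) :
    ∀ (t : List Char), (∀ c ∈ t, c ∈ gs) → ∀ (r0 : Int),
    (t.foldl (pvRankStep (pvIdxDict gs) (gs.length : Int)) (r0, true)).1 =
      r0 * (gs.length : Int) ^ t.length + (pvRk gs t : Int) := by
  intro t
  induction t with
  | nil => intro _ r0; simp [pvRk]
  | cons c t ih =>
    intro h r0
    have hc : c ∈ gs := h c List.mem_cons_self
    have hrk : pvRk gs (c :: t) = List.idxOf c gs * gs.length ^ t.length + pvRk gs t := by
      show t.foldl _ (0 * gs.length + List.idxOf c gs) = _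
      rw [pvRk_from]
      ring_nf
    have hstep : pvRankStep (pvIdxDict gs) (gs.length : Int) (r0, true) c
        = (r0 * (gs.length : Int) + ((List.idxOf c gs : Nat) : Int), true) := by
      simp [pvRankStep, pvIdxDict_get? gs hnd c, hc]
    simp only [List.foldl_cons, hstep]
    rw [ih (fun x hx => h x (List.mem_cons_of_mem _ hx)) (r0 * (gs.length : Int) + ((List.idxOf c gs : Nat) : Int))]
    rw [hrk]
    push_cast
    simp only [List.length_cons]
    ring

theorem pvDecorate_toList (p s : Option String) (k : List Char) :
    (pvDecorate p s k).toList = (p.getD "").toList ++ k ++ (s.getD "").toList := by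
  cases p with
  | none =>
    cases s with
    | none => simp [pvDecorate]
    | some ss =>
      by_cases hs : ss = "" <;> simp [pvDecorate, hs]
  | some ps =>
    cases s with
    | none =>
      by_cases hp : ps = "" <;> simp [pvDecorate, hp]
    | some ss =>
      by_cases hp : ps = "" <;> by_cases hs : ss = "" <;> simp [pvDecorate, hp, hs]


theorem pvParse_decorate (gs : List Char) (p s : Option String) (length : Int) (t : List Char)
    (hlen : t.length = length.toNat) (hmem : ∀ c ∈ t, c ∈ gs) :
    pvKernelOf? gs p s length (pvDecorate p s t) = some t := by
  unfold pvKernelOf?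
  rw [pvDecorate_toList]
  set P := (p.getD "").toList with hP
  set S := (s.getD "").toList with hS
  have hdrop : (P ++ t ++ S).drop P.length = t ++ S := by
    rw [List.append_assoc, List.drop_left]
  have hkernel : ((P ++ t ++ S).drop P.length).take length.toNat = t := by
    rw [hdrop, ← hlen, List.take_left]
  rw [if_pos]
  · rw [hkernel]
  refine ⟨?_, ?_, ?_, ?_⟩
  · simp [← hlen]; omega
  · rw [List.append_assoc]; exact List.prefix_append _ _
  · exact List.suffix_append _ _
  · rw [hkernel]; exact hmem


theorem pvParse_inv (gs : List Char) (p s : Option String) (length : Int) (str : String)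
    (t : List Char) (h : pvKernelOf? gs p s length str = some t) :
    str = pvDecorate p s t ∧ t.length = length.toNat ∧ ∀ c ∈ t, c ∈ gs := by
  unfold pvKernelOf? at h
  dsimp only at h
  set P := (p.getD "").toList with hP
  set S := (s.getD "").toList with hS
  set l := str.toList with hl
  set n := length.toNat with hn
  split at h
  case isFalse => exact absurd h (by simp)
  case isTrue hcond =>
    obtain ⟨hlen, hpre, hsuf, hall⟩ := hcond
    have ht : t = (l.drop P.length).take n := by
      have := Option.some.inj h; exact this.symm
    have htl : t.length = n := by
      rw [ht, List.length_take, List.length_drop, hlen]; omega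
    have hsplit : l = P ++ t ++ S := by
      have h1 : l = P ++ l.drop P.length := by
        have := List.prefix_iff_eq_take.mp hpre
        conv_lhs => rw [← List.take_append_drop P.length l]
        rw [← this]
      have h2 : l.drop P.length = t ++ l.drop (P.length + n) := by
        conv_lhs => rw [← List.take_append_drop n (l.drop P.length)]
        rw [← ht, List.drop_drop, Nat.add_comm]
      have h3 : l.drop (P.length + n) = S := by
        have := List.suffix_iff_eq_drop.mp hsuf
        rw [this, hlen]
        congr 1
        omega
      rw [List.append_assoc]
      rw [h1, h2, h3]
    refine ⟨?_, htl, fun c hc => hall c (ht ▸ hc)⟩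
    apply String.ext
    rw [pvDecorate_toList, ← hP, ← hS, ← hl, hsplit]


theorem pvDecode_eq (gs : List Char) (hb : gs ≠ []) :
    ∀ (n : Nat) (ds : List Char) (j : Nat),
    pvDecodeLoop gs (gs.length : Int) n (ds, (j : Int)) =
      (ds ++ pvDigitsLSB gs n j, ((j / gs.length ^ n : Nat) : Int)) := by
  have hb0 : 0 < gs.length := List.length_pos_of_ne_nil hb
  intro n
  induction n with
  | zero => intro ds j; simp [pvDecodeLoop, pvDigitsLSB]
  | succ n ih =>
    intro ds j
    show pvDecodeLoop gs (gs.length : Int) n _ = _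
    rw [PySem.Int.mod_natCast, PySem.Int.floordiv_natCast]
    have hget : (PySem.List.pyGet? gs ((j % gs.length : Nat) : Int)).getD ' '
        = gs.getD (j % gs.length) ' ' := by
      rw [PySem.List.pyGet?_natCast, List.getD_eq_getElem?_getD]
    rw [hget, ih (ds ++ [gs.getD (j % gs.length) ' ']) (j / gs.length)]
    simp only [Prod.mk.injEq]
    refine ⟨?_, ?_⟩
    · show ds ++ [gs.getD (j % gs.length) ' '] ++ pvDigitsLSB gs n (j / gs.length)
        = ds ++ pvDigitsLSB gs (n+1) j
      rw [List.append_assoc]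
      rfl
    · show ((j / gs.length / gs.length ^ n : Nat) : Int) = ((j / gs.length ^ (n+1) : Nat) : Int)
      rw [Nat.div_div_eq_div_mul, ← pow_succ']


theorem pvDigits_spec (gs : List Char) (hnd : gs.Nodup) (hb : gs ≠ []) :
    ∀ (n : Nat) (j : Nat), j < gs.length ^ n →
    (pvDigitsLSB gs n j).reverse.length = n ∧ (∀ c ∈ (pvDigitsLSB gs n j).reverse, c ∈ gs) ∧
    pvRk gs (pvDigitsLSB gs n j).reverse = j := by
  have hb0 : 0 < gs.length := List.length_pos_of_ne_nil hb
  intro n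
  induction n with
  | zero =>
    intro j hj
    have : j = 0 := by simpa using hj
    subst this
    simp [pvDigitsLSB, pvRk]
  | succ n ih =>
    intro j hj
    have hjd : j / gs.length < gs.length ^ n := by
      rw [Nat.div_lt_iff_lt_mul hb0]
      calc j < gs.length ^ (n+1) := hj
        _ = gs.length ^ n * gs.length := by rw [pow_succ]
    obtain ⟨ihl, ihm, ihr⟩ := ih (j / gs.length) hjd
    have hmod : j % gs.length < gs.length := Nat.mod_lt _ hb0
    have hd : gs.getD (j % gs.length) ' ' = gs[j % gs.length] := List.getD_eq_getElem gs ' ' hmod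
    have hrev : (pvDigitsLSB gs (n+1) j).reverse
        = (pvDigitsLSB gs n (j / gs.length)).reverse ++ [gs.getD (j % gs.length) ' '] := by
      show (gs.getD (j % gs.length) ' ' :: pvDigitsLSB gs n (j / gs.length)).reverse = _
      rw [List.reverse_cons]
    refine ⟨?_, ?_, ?_⟩
    · rw [hrev, List.length_append, ihl]; simp
    · intro c hc
      rw [hrev, List.mem_append] at hc
      rcases hc with hc | hc
      · exact ihm c hc
      · rw [List.mem_singleton] at hc
        subst hc
        rw [hd]
        exact List.getElem_mem _
    · rw [hrev, pvRk_append_singleton, ihr, hd, List.Nodup.idxOf_getElem hnd _ hmod,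
        Nat.mul_comm]
      exact Nat.div_add_mod j gs.length


theorem pvProd_length (gs : List Char) (hnd : gs.Nodup) (n : Nat) :
    (pvProdAll gs n).length = gs.length ^ n := by
  have := congrArg List.length (pvProd_map_rk gs hnd n)
  simpa using this

theorem pvRk_getElem (gs : List Char) (hnd : gs.Nodup) (n : Nat) (i : Nat)
    (hi : i < (pvProdAll gs n).length) :
    pvRk gs ((pvProdAll gs n)[i]'hi) = i := by
  have h1 : (List.map (pvRk gs) (pvProdAll gs n))[i]'(by simpa using hi)
      = pvRk gs ((pvProdAll gs n)[i]'hi) := List.getElem_map _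
  have h2 := List.getElem_of_eq (pvProd_map_rk gs hnd n) (by simpa using hi)
  rw [← h1, h2, List.getElem_range]

theorem pvRk_lt (gs : List Char) (hnd : gs.Nodup) (n : Nat) (t : List Char)
    (ht : t ∈ pvProdAll gs n) : pvRk gs t < gs.length ^ n := by
  have : pvRk gs t ∈ List.map (pvRk gs) (pvProdAll gs n) := List.mem_map_of_mem ht
  rw [pvProd_map_rk gs hnd n] at this
  exact List.mem_range.mp this

theorem pvRk_inj (gs : List Char) (hnd : gs.Nodup) (n : Nat) {t t' : List Char}
    (ht : t ∈ pvProdAll gs n) (ht' : t' ∈ pvProdAll gs n)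
    (h : pvRk gs t = pvRk gs t') : t = t' := by
  obtain ⟨i, hi, rfl⟩ := List.mem_iff_getElem.mp ht
  obtain ⟨i', hi', rfl⟩ := List.mem_iff_getElem.mp ht'
  rw [pvRk_getElem gs hnd n i hi, pvRk_getElem gs hnd n i' hi'] at h
  subst h
  rfl

def pvOptAdd (rs : PySem.Set Int) (o : Option Int) : PySem.Set Int :=
  match o with
  | some v => PySem.Set.add rs v
  | none => rs

theorem pv_foldl_optadd {α : Type} (f : α → Option Int) :
    ∀ (l : List α) (rs : List Int),
    l.foldl (fun rs a => pvOptAdd rs (f a)) rs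
      = (l.filterMap f).foldl PySem.Set.add rs := by
  intro l
  induction l with
  | nil => intro rs; simp
  | cons x l ih =>
    intro rs
    simp only [List.foldl_cons, List.filterMap_cons]
    cases hfx : f x with
    | none => simp only [hfx, pvOptAdd]; exact ih rs
    | some v => simp only [hfx, pvOptAdd, List.foldl_cons]; exact ih _

theorem pvStep_eq (gs : List Char) (hnd : gs.Nodup) (p s : Option String) (length : Int)
    (hlen0 : 0 ≤ length) (rs : PySem.Set Int) (str : String) :
    (if PySem.Str.len str ≠ PySem.Str.len (p.getD "") + length + PySem.Str.len (s.getD "") then rs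
     else if ¬ (PySem.Str.startswith str (p.getD "") = true ∧ PySem.Str.endswith str (s.getD "") = true) then rs
     else if ((PySem.Str.slice str (some (PySem.Str.len (p.getD "")))
                (some (PySem.Str.len (p.getD "") + length))).toList.foldl
              (pvRankStep (pvIdxDict gs) (gs.length : Int)) ((0 : Int), true)).2 = true
     then PySem.Set.add rs ((PySem.Str.slice str (some (PySem.Str.len (p.getD "")))
                (some (PySem.Str.len (p.getD "") + length))).toList.foldl
              (pvRankStep (pvIdxDict gs) (gs.length : Int)) ((0 : Int), true)).1
     else rs)
    = pvOptAdd rs ((pvKernelOf? gs p s length str).map (fun t => ((pvRk gs t : Nat) : Int))) := by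
  have hcast : length = ((length.toNat : Nat) : Int) := (Int.toNat_of_nonneg hlen0).symm
  have hlenstr : ∀ u : String, PySem.Str.len u = (u.toList.length : Int) := fun u => by simp
  have hK : pvKernelOf? gs p s length str =
      (if (str.toList.length = (p.getD "").toList.length + length.toNat + (s.getD "").toList.length
            ∧ (p.getD "").toList <+: str.toList ∧ (s.getD "").toList <:+ str.toList
            ∧ ∀ c ∈ (str.toList.drop (p.getD "").toList.length).take length.toNat, c ∈ gs)
       then some ((str.toList.drop (p.getD "").toList.length).take length.toNat) else none) := rfl
  have hlen_iff : (PySem.Str.len str = PySem.Str.len (p.getD "") + length + PySem.Str.len (s.getD ""))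
      ↔ str.toList.length = (p.getD "").toList.length + length.toNat + (s.getD "").toList.length := by
    rw [hlenstr, hlenstr, hlenstr, hcast]
    omega
  have hsw : (PySem.Str.startswith str (p.getD "") = true) ↔ (p.getD "").toList <+: str.toList := by
    simp [PySem.Chars.startswith_iff]
  have hew : (PySem.Str.endswith str (s.getD "") = true) ↔ (s.getD "").toList <:+ str.toList := by
    simp [PySem.Chars.endswith_iff]
  have hsl : (PySem.Str.slice str (some (PySem.Str.len (p.getD "")))
      (some (PySem.Str.len (p.getD "") + length))).toList
      = (str.toList.drop (p.getD "").toList.length).take length.toNat := by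
    rw [PySem.Str.toList_slice, PySem.Chars.slice_eq_listSlice]
    rw [show PySem.Str.len (p.getD "") + length
        = ((((p.getD "").toList.length + length.toNat : Nat)) : Int) from by
      rw [hlenstr]; push_cast; omega]
    rw [hlenstr (p.getD "")]
    rw [PySem.List.slice_natCast]
    rw [Nat.add_sub_cancel_left]
  rw [hK]
  by_cases h1 : str.toList.length = (p.getD "").toList.length + length.toNat + (s.getD "").toList.length
  · rw [if_neg (not_not_intro (hlen_iff.mpr h1))]
    by_cases h2 : (p.getD "").toList <+: str.toList ∧ (s.getD "").toList <:+ str.toList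
    · rw [if_neg (not_not_intro ⟨hsw.mpr h2.1, hew.mpr h2.2⟩)]
      rw [hsl]
      by_cases h3 : ∀ c ∈ (str.toList.drop (p.getD "").toList.length).take length.toNat, c ∈ gs
      · rw [if_pos (by rw [pvRankFold_snd gs hnd]; simp only [Bool.true_and]; exact List.all_eq_true.mpr fun c hc => decide_eq_true (h3 c hc))]
        rw [if_pos ⟨h1, h2.1, h2.2, h3⟩]
        simp only [Option.map_some, pvOptAdd]
        congr 1
        rw [pvRankFold_fst gs hnd _ h3 0]
        simp
      · rw [if_neg (by rw [pvRankFold_snd gs hnd]; simp only [Bool.true_and]; intro hall; exact h3 fun c hc => of_decide_eq_true (List.all_eq_true.mp hall c hc))]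
        rw [if_neg (fun hc => h3 hc.2.2.2)]
        rfl
    · rw [if_pos (fun hc => h2 ⟨hsw.mp hc.1, hew.mp hc.2⟩)]
      rw [if_neg (fun hc => h2 ⟨hc.2.1, hc.2.2.1⟩)]
      rfl
  · rw [if_pos (by rw [Ne, hlen_iff]; exact h1)]
    rw [if_neg (fun hc => h1 hc.1)]
    rfl

-- ===== VERDICT (by name: the statement is the Claim_ definition above) =====
theorem unique_string_spec : Claim_equal_unique_string := by
  intro ex length lower upper number prefix_ suffix hdom hpre
  obtain ⟨hflags, hlen0, hfull⟩ := hpre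
  show unique_string ex length lower upper number prefix_ suffix
      = unique_string_alt ex length lower upper number prefix_ suffix
  have hne : pvGenSet lower upper number ≠ [] := pvGenSet_ne_nil _ _ _ hflags
  have hnd : (pvGenSet lower upper number).Nodup := pvGenSet_nodup _ _ _
  have hb0 : 0 < (pvGenSet lower upper number).length := List.length_pos_of_ne_nil hne
  have hEmpty : (pvGenSet lower upper number).isEmpty = false := by
    simp [List.isEmpty_iff, hne]
  simp only [unique_string, unique_string_alt, hEmpty, Bool.false_eq_true, if_false]
  set gs := pvGenSet lower upper number with hgsd
  set n := length.toNat with hnn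
  rw [pvSearchA_eq ex gs prefix_ suffix n []]
  simp only [List.nil_append]
  simp only [pvStep_eq gs hnd prefix_ suffix length hlen0]
  have hse : (PySem.Set.empty : PySem.Set Int) = ([] : List Int) := rfl
  rw [hse, pv_foldl_optadd (fun str =>
    (pvKernelOf? gs prefix_ suffix length str).map (fun t => ((pvRk gs t : Nat) : Int))) ex [],
    ← PySem.Set.ofList_eq_foldl]
  set RL := ex.filterMap (fun str =>
    (pvKernelOf? gs prefix_ suffix length str).map (fun t => ((pvRk gs t : Nat) : Int))) with hRLd
  set m := (PySem.List.sorted (PySem.Set.ofList RL) (fun x => x) false).foldl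
    (fun m r => if r = m then m + 1 else m) (0 : Int) with hmd
  have hsorted := PySem.List.sorted_ofList_pairwise_lt (κ := Int) RL
  obtain ⟨hm1, hm0, hm2⟩ := pv_mexfold_spec
    (PySem.List.sorted (PySem.Set.ofList RL) (fun x => x) false) 0 hsorted
  rw [← hmd] at hm1 hm0 hm2
  have hmemSR : ∀ r : Int,
      r ∈ PySem.List.sorted (PySem.Set.ofList RL) (fun x => x) false ↔ r ∈ RL := by
    intro r
    rw [PySem.List.mem_sorted, PySem.Set.mem_ofList]
  have hcont : ∀ t ∈ pvProdAll gs n,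
      (ex.contains (pvDecorate prefix_ suffix t) = true ↔ ((pvRk gs t : Nat) : Int) ∈ RL) := by
    intro t ht
    obtain ⟨htl, htm⟩ := (pv_mem_prodAll gs n t).mp ht
    constructor
    · intro hc
      have hmem : pvDecorate prefix_ suffix t ∈ ex := List.contains_iff_mem.mp hc
      refine List.mem_filterMap.mpr ⟨pvDecorate prefix_ suffix t, hmem, ?_⟩
      rw [pvParse_decorate gs prefix_ suffix length t (by rw [htl, hnn]) htm]
      rfl
    · intro hr
      obtain ⟨str, hstr, hf⟩ := List.mem_filterMap.mp hr
      obtain ⟨t', hkt', hveq⟩ := Option.map_eq_some_iff.mp hf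
      obtain ⟨hstr_eq, ht'l, ht'm⟩ := pvParse_inv gs prefix_ suffix length str t' hkt'
      have ht'P : t' ∈ pvProdAll gs n := (pv_mem_prodAll gs n t').mpr ⟨by rw [ht'l, hnn], ht'm⟩
      have hrkeq : pvRk gs t' = pvRk gs t := by exact_mod_cast hveq
      have := pvRk_inj gs hnd n ht'P ht hrkeq
      subst this
      rw [← hstr_eq]
      exact List.contains_iff_mem.mpr hstr
  have hcastpow : ((gs.length : Int)) ^ n = ((gs.length ^ n : Nat) : Int) := by push_cast; ring
  by_cases hcase : ((gs.length : Int)) ^ n ≤ m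
  · rw [if_pos hcase]
    have hnone : (pvProdAll gs n).find?
        (fun t => !(ex.contains (pvDecorate prefix_ suffix t))) = none := by
      rw [List.find?_eq_none]
      intro t ht
      have hlt : ((pvRk gs t : Nat) : Int) < (gs.length : Int) ^ n := by
        rw [hcastpow]
        exact_mod_cast pvRk_lt gs hnd n t ht
      have hmemR : ((pvRk gs t : Nat) : Int) ∈ RL :=
        (hmemSR _).mp (hm2 _ (Int.natCast_nonneg _) (lt_of_lt_of_le hlt hcase))
      have hmem' : pvDecorate prefix_ suffix t ∈ ex :=
        List.contains_iff_mem.mp ((hcont t ht).mpr hmemR)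
      simp [hmem']
    rw [hnone]
    rfl
  · rw [if_neg hcase]
    have hmlt : m.toNat < gs.length ^ n := by
      have h1 : m < ((gs.length ^ n : Nat) : Int) := by rw [← hcastpow]; omega
      omega
    have hmnat : ((m.toNat : Nat) : Int) = m := Int.toNat_of_nonneg hm0
    rw [show m = ((m.toNat : Nat) : Int) from hmnat.symm, pvDecode_eq gs hne n [] m.toNat]
    simp only [List.nil_append]
    obtain ⟨hdl, hdm, hdr⟩ := pvDigits_spec gs hnd hne n m.toNat hmlt
    have hKP : (pvDigitsLSB gs n m.toNat).reverse ∈ pvProdAll gs n :=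
      (pv_mem_prodAll gs n _).mpr ⟨hdl, hdm⟩
    have hplen : (pvProdAll gs n).length = gs.length ^ n := pvProd_length gs hnd n
    have hmlt' : m.toNat < (pvProdAll gs n).length := by rw [hplen]; exact hmlt
    have hfind : (pvProdAll gs n).find?
        (fun t => !(ex.contains (pvDecorate prefix_ suffix t)))
        = some ((pvProdAll gs n)[m.toNat]'hmlt') := by
      apply pv_find?_eq_getElem _ _ m.toNat hmlt'
      · intro i hi
        have hiP : i < (pvProdAll gs n).length := by omega
        have hrk : pvRk gs ((pvProdAll gs n)[i]'hiP) = i := pvRk_getElem gs hnd n i hiP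
        have hilt : ((i : Nat) : Int) < m := by omega
        have hmemR : ((i : Nat) : Int) ∈ RL :=
          (hmemSR _).mp (hm2 _ (Int.natCast_nonneg _) hilt)
        have hmem' : pvDecorate prefix_ suffix ((pvProdAll gs n)[i]'hiP) ∈ ex := by
          apply List.contains_iff_mem.mp
          apply (hcont _ (List.getElem_mem hiP)).mpr
          rw [hrk]
          exact hmemR
        simp [hmem']
      · have hrk : pvRk gs ((pvProdAll gs n)[m.toNat]'hmlt') = m.toNat :=
          pvRk_getElem gs hnd n m.toNat hmlt'
        have hnc : ex.contains (pvDecorate prefix_ suffix ((pvProdAll gs n)[m.toNat]'hmlt')) = false := by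
          by_contra hcc
          have hcc' : ex.contains (pvDecorate prefix_ suffix ((pvProdAll gs n)[m.toNat]'hmlt')) = true := by
            cases h : ex.contains (pvDecorate prefix_ suffix ((pvProdAll gs n)[m.toNat]'hmlt'))
            · exact absurd h hcc
            · rfl
          have hmemR := (hcont _ (List.getElem_mem hmlt')).mp hcc'
          rw [hrk, hmnat] at hmemR
          exact hm1 ((hmemSR m).mpr hmemR)
        have hmem' : pvDecorate prefix_ suffix ((pvProdAll gs n)[m.toNat]'hmlt') ∉ ex := by
          intro hmm
          rw [List.contains_iff_mem.mpr hmm] at hnc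
          simp at hnc
        simp [hmem']
    rw [hfind]
    have hKeq : (pvProdAll gs n)[m.toNat]'hmlt' = (pvDigitsLSB gs n m.toNat).reverse := by
      apply pvRk_inj gs hnd n (List.getElem_mem hmlt') hKP
      rw [pvRk_getElem gs hnd n m.toNat hmlt', hdr]
    rw [hKeq]
    show pvDecorate prefix_ suffix ((pvDigitsLSB gs n m.toNat).reverse) = _
    apply String.ext
    rw [pvDecorate_toList]
    simp
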